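-- pv_equiv track=rewrite | github.com/drathke924/userscripts | Advent_Of_Code_2017/day3.py | fill_the_grid
-- ===== SOURCE A (Python) =====
-- def fill_the_grid(input):
-- 	output = {}
-- 	step = 1
-- 	travel = 1
-- 	# right = 0, up = 1, left = 2, down = 3
-- 	direction = 0
-- 	x = 0
-- 	y = 0
-- 	output[step] = (x, y)
-- 	while step < input:
-- 		for i in range(0, 2):
-- 			for j in range(0, travel):
-- 				step += 1
-- 				if direction == 0:
-- 					x += 1
-- 				elif direction == 1:
-- 					y += 1
-- 				elif direction == 2:
-- 					x -= 1
-- 				else: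
-- 					y -= 1
-- 				output[step] = (x, y)
-- 			direction = (direction + 1) % 4
-- 		travel += 1
-- 	return output
-- ===== SOURCE B (Python) =====
-- def fill_the_grid(input):
--     # find the final half-ring count t: A completes whole (right,up)/(left,down)
--     # pairs, ending with 1 + t*(t+1) cells recorded
--     t = 0
--     while 1 + t * (t + 1) < input:
--         t += 1
--     coords = [(0, 0)]
--     for tr in range(1, t + 1):
--         if tr % 2 == 1:
--             k = (tr + 1) // 2
--             coords += [(i - k + 1, 1 - k) for i in range(1, tr + 1)]
--             coords += [(k, i - k + 1) for i in range(1, tr + 1)]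
--         else:
--             k = tr // 2
--             coords += [(k - i, k) for i in range(1, tr + 1)]
--             coords += [(-k, k - i) for i in range(1, tr + 1)]
--     return {n + 1: c for n, c in enumerate(coords)}
-- ===== Notes on version B (the rewrite author's own statement) =====
-- stated objective: alternative
-- what changed: Replaces A's cursor state machine (x/y position, direction register, three nested loops) by first solving 1+t(t+1) >= input for the number of half-rings and then emitting each half-ring's coordinates with closed-form side formulas (list comprehensions), enumerating them into the dict at the end.
import Mathlib
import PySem

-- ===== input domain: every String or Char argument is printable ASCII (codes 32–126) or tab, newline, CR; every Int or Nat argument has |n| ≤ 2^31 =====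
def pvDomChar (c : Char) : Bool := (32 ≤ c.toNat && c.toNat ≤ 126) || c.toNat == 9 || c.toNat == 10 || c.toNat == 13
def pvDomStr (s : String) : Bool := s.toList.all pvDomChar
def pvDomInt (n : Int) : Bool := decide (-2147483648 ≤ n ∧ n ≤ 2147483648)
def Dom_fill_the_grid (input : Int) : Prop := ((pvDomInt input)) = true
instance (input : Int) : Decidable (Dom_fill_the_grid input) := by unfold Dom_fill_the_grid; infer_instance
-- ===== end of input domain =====

-- B replaces A's cursor/direction state machine by closed-form half-ring side formulas; equal return value everywhere (same dict, same insertion order).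

-- ===== PORT A =====
-- one iteration of A's innermost j-loop body: state (output, step, x, y)
def aStep (direction : Int) (st : PySem.Dict Int (Int × Int) × Int × Int × Int) :
    PySem.Dict Int (Int × Int) × Int × Int × Int :=
  let out := st.1
  let step := st.2.1 + 1
  let x := st.2.2.1
  let y := st.2.2.2
  if direction = 0 then (out.insert step (x + 1, y), step, x + 1, y)
  else if direction = 1 then (out.insert step (x, y + 1), step, x, y + 1)
  else if direction = 2 then (out.insert step (x - 1, y), step, x - 1, y)
  else (out.insert step (x, y - 1), step, x, y - 1)

-- 'for j in range(0, travel)'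
def aSeg (direction travel : Int) (st : PySem.Dict Int (Int × Int) × Int × Int × Int) :
    PySem.Dict Int (Int × Int) × Int × Int × Int :=
  (PySem.List.pyRange 0 travel 1).foldl (fun st _ => aStep direction st) st

-- 'for i in range(0, 2)': state (output, step, direction, x, y)
def aLap (travel : Int) (st : PySem.Dict Int (Int × Int) × Int × Int × Int × Int) :
    PySem.Dict Int (Int × Int) × Int × Int × Int × Int :=
  (PySem.List.pyRange 0 2 1).foldl
    (fun st _ =>
      let r := aSeg st.2.2.1 travel (st.1, st.2.1, st.2.2.2.1, st.2.2.2.2)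
      (r.1, r.2.1, PySem.Int.mod (st.2.2.1 + 1) 4, r.2.2.1, r.2.2.2)) st

-- step bookkeeping needed by aLoop's termination argument (cited in decreasing_by)
theorem aStep_snd (d : Int) (st : PySem.Dict Int (Int × Int) × Int × Int × Int) :
    (aStep d st).2.1 = st.2.1 + 1 := by
  unfold aStep; split_ifs <;> rfl

theorem aSegF_snd (d : Int) (l : List Int) (st : PySem.Dict Int (Int × Int) × Int × Int × Int) :
    ((l.foldl (fun st _ => aStep d st) st).2.1) = st.2.1 + l.length := by
  induction l generalizing st with
  | nil => simp
  | cons a t ih => simp [List.foldl_cons, ih, aStep_snd]; ring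

theorem aSeg_snd (d travel : Int) (st : PySem.Dict Int (Int × Int) × Int × Int × Int) :
    (aSeg d travel st).2.1 = st.2.1 + (travel.toNat : Int) := by
  unfold aSeg
  rw [aSegF_snd]
  simp [PySem.List.length_pyRange_one]

theorem aLap_snd (travel : Int) (st : PySem.Dict Int (Int × Int) × Int × Int × Int × Int) :
    (aLap travel st).2.1 = st.2.1 + 2 * (travel.toNat : Int) := by
  have h2 : PySem.List.pyRange 0 2 1 = [0, 1] := by decide
  unfold aLap
  rw [h2]
  simp [List.foldl_cons, aSeg_snd]
  ring

-- 'while step < input' (ht records that travel, initially 1 and only incremented, stays ≥ 1)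
def aLoop (input : Int) (out : PySem.Dict Int (Int × Int)) (step travel direction x y : Int)
    (ht : 1 ≤ travel) : PySem.Dict Int (Int × Int) :=
  if h : step < input then
    let st := aLap travel (out, step, direction, x, y)
    aLoop input st.1 st.2.1 (travel + 1) st.2.2.1 st.2.2.2.1 st.2.2.2.2 (by omega)
  else out
termination_by (input - step).toNat
decreasing_by
  have hs := aLap_snd travel (out, step, direction, x, y)
  simp only at hs
  omega

def fill_the_grid (input : Int) : List (Int × Int × Int) :=
  (aLoop input (PySem.Dict.empty.insert 1 ((0 : Int), (0 : Int))) 1 1 0 0 0 (by norm_num)).items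

-- ===== PORT B =====
-- 'while 1 + t*(t+1) < input: t += 1'
def bFindT (input t : Int) : Int :=
  if h : 1 + t * (t + 1) < input then bFindT input (t + 1) else t
termination_by (input - t).toNat
decreasing_by
  have hsq : 0 ≤ t * t := mul_self_nonneg t
  have hr : t * (t + 1) = t * t + t := by ring
  omega

-- body of 'for tr in range(1, t+1)': the two comprehensions of one half-ring
def bRing (acc : List (Int × Int)) (tr : Int) : List (Int × Int) :=
  if PySem.Int.mod tr 2 = 1 then
    let k := PySem.Int.floordiv (tr + 1) 2
    acc ++ (PySem.List.pyRange 1 (tr + 1) 1).map (fun i => (i - k + 1, 1 - k))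
        ++ (PySem.List.pyRange 1 (tr + 1) 1).map (fun i => (k, i - k + 1))
  else
    let k := PySem.Int.floordiv tr 2
    acc ++ (PySem.List.pyRange 1 (tr + 1) 1).map (fun i => (k - i, k))
        ++ (PySem.List.pyRange 1 (tr + 1) 1).map (fun i => (-k, k - i))

def fill_the_grid_alt (input : Int) : List (Int × Int × Int) :=
  let t := bFindT input 0
  let coords := (PySem.List.pyRange 1 (t + 1) 1).foldl bRing [((0 : Int), (0 : Int))]
  -- '{n + 1: c for n, c in enumerate(coords)}'
  ((PySem.List.enumerate coords 0).foldl
    (fun (d : PySem.Dict Int (Int × Int)) p => d.insert (p.1 + 1) p.2) PySem.Dict.empty).items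

-- ===== PRECONDITION & SPEC =====
def Spec_fill_the_grid (input : Int) (out : List (Int × Int × Int)) : Prop := out = fill_the_grid_alt input
instance (input : Int) (out : List (Int × Int × Int)) : Decidable (Spec_fill_the_grid input out) := by unfold Spec_fill_the_grid; infer_instance

-- ===== CLAIM (what is proved, stated in full; the proofs are below) =====
def Claim_equal_fill_the_grid : Prop := ∀ (input : Int), Dom_fill_the_grid input → Spec_fill_the_grid input (fill_the_grid input)

-- ===== LEMMAS AND PROOFS =====

-- the direction vector A's if/elif chain realises
def vec (d : Int) : Int × Int :=
  if d = 0 then (1, 0) else if d = 1 then (0, 1) else if d = 2 then (-1, 0) else (0, -1)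

theorem aStep_eq (d : Int) (st : PySem.Dict Int (Int × Int) × Int × Int × Int) :
    aStep d st = (st.1.insert (st.2.1 + 1) (st.2.2.1 + (vec d).1, st.2.2.2 + (vec d).2),
      st.2.1 + 1, st.2.2.1 + (vec d).1, st.2.2.2 + (vec d).2) := by
  unfold aStep vec
  split_ifs <;> simp <;> ring_nf <;> simp

-- the dict A has built after recording coordinate list l (keys 1..len l, in order)
def dictOf (l : List (Int × Int)) : PySem.Dict Int (Int × Int) :=
  PySem.Dict.mk ((PySem.List.enumerate l 0).map (fun p => (p.1 + 1, p.2)))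

-- coordinates of A's half-ring number tr (= B's bRing payload)
def trCoords (tr : Int) : List (Int × Int) :=
  if PySem.Int.mod tr 2 = 1 then
    let k := PySem.Int.floordiv (tr + 1) 2
    (PySem.List.pyRange 1 (tr + 1) 1).map (fun i => (i - k + 1, 1 - k))
      ++ (PySem.List.pyRange 1 (tr + 1) 1).map (fun i => (k, i - k + 1))
  else
    let k := PySem.Int.floordiv tr 2
    (PySem.List.pyRange 1 (tr + 1) 1).map (fun i => (k - i, k))
      ++ (PySem.List.pyRange 1 (tr + 1) 1).map (fun i => (-k, k - i))

def spiral : Nat → List (Int × Int)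
  | 0 => [(0, 0)]
  | m + 1 => spiral m ++ trCoords ((m : Int) + 1)

def posEnd (m : Nat) : Int × Int :=
  if m % 2 = 1 then (((m : Int) + 1) / 2, ((m : Int) + 1) / 2)
  else (-((m : Int) / 2), -((m : Int) / 2))

def dirAt (m : Nat) : Int := if m % 2 = 0 then 0 else 2

def Tfin (input : Int) (m : Nat) : Nat :=
  if h : 1 + (m : Int) * ((m : Int) + 1) < input then Tfin input (m + 1) else m
termination_by (input - m).toNat
decreasing_by
  have hsq : 0 ≤ (m : Int) * (m : Int) := mul_self_nonneg _
  have hr : (m : Int) * ((m : Int) + 1) = (m : Int) * (m : Int) + (m : Int) := by ring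
  omega

theorem trCoords_length (tr : Int) (_h : 0 ≤ tr) : (trCoords tr).length = 2 * tr.toNat := by
  unfold trCoords
  split_ifs <;> simp [PySem.List.length_pyRange_one] <;> omega


theorem spiral_length (m : Nat) : (spiral m).length = 1 + m * (m + 1) := by
  induction m with
  | zero => rfl
  | succ m ih =>
    show (spiral m ++ trCoords ((m : Int) + 1)).length = _
    rw [List.length_append, ih, trCoords_length _ (by omega)]
    have : ((m : Int) + 1).toNat = m + 1 := by omega
    rw [this]; ring

theorem dict_ext {d1 d2 : PySem.Dict Int (Int × Int)} (h : d1.items = d2.items) : d1 = d2 := by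
  cases d1; cases d2; cases h; rfl

theorem dictOf_snoc (l : List (Int × Int)) (v : Int × Int) :
    (dictOf l).insert ((l.length : Int) + 1) v = dictOf (l ++ [v]) := by
  have hc : (dictOf l).contains ((l.length : Int) + 1) = false := by
    unfold dictOf
    rw [PySem.Dict.contains_mk]
    rw [List.any_eq_false]
    intro p hp
    simp only [List.mem_map] at hp
    obtain ⟨q, hq, rfl⟩ := hp
    rw [PySem.List.mem_enumerate_iff] at hq
    obtain ⟨k, hk, rfl⟩ := hq
    simp only [beq_iff_eq]
    omega
  apply dict_ext
  rw [PySem.Dict.items_insert_of_not_contains _ _ hc]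
  unfold dictOf
  simp [PySem.List.enumerate_append, PySem.List.enumerate_cons, PySem.List.enumerate_nil]

theorem aSeg_spec (d : Int) (n : Nat) (l : List (Int × Int)) (x y : Int) :
    aSeg d (n : Int) (dictOf l, (l.length : Int), x, y)
    = (dictOf (l ++ (List.range n).map
        (fun (i : Nat) => (x + ((i : Int) + 1) * (vec d).1, y + ((i : Int) + 1) * (vec d).2))),
       (l.length : Int) + n, x + n * (vec d).1, y + n * (vec d).2) := by
  induction n with
  | zero =>
    simp [aSeg, PySem.List.pyRange_one_eq_nil le_rfl]
  | succ n ih =>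
    unfold aSeg at ih ⊢
    have hc : ((n + 1 : Nat) : Int) = (n : Int) + 1 := by push_cast; ring
    rw [hc, PySem.List.pyRange_one_succ_right (by positivity), List.foldl_append, ih]
    simp only [List.foldl_cons, List.foldl_nil]
    rw [aStep_eq]
    simp only [Prod.mk.injEq]
    refine ⟨?_, by ring, by ring, by ring⟩
    have hlen : (l.length : Int) + (n : Int) + 1
        = (((l ++ (List.range n).map (fun (i : Nat) => (x + ((i : Int) + 1) * (vec d).1,
            y + ((i : Int) + 1) * (vec d).2))).length : Int)) + 1 := by
      simp
    rw [hlen, dictOf_snoc, List.append_assoc]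
    have hp : (x + (n : Int) * (vec d).1 + (vec d).1, y + (n : Int) * (vec d).2 + (vec d).2)
        = (x + ((n : Int) + 1) * (vec d).1, y + ((n : Int) + 1) * (vec d).2) := by
      simp only [Prod.mk.injEq]; constructor <;> ring
    rw [List.range_succ, List.map_append, List.map_singleton, hp]

theorem map_range_eq_pyRange (n : Nat) (f : Nat → Int × Int) (g : Int → Int × Int)
    (h : ∀ i : Nat, i < n → f i = g (1 + (i : Int))) :
    (List.range n).map f = (PySem.List.pyRange 1 ((n : Int) + 1) 1).map g := by
  rw [PySem.List.pyRange_one]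
  have hn : ((n : Int) + 1 - 1).toNat = n := by omega
  rw [hn, List.map_map]
  exact List.map_congr_left (fun i hi => h i (List.mem_range.mp hi))

theorem aLap_spec (m : Nat) :
    aLap ((m : Int) + 1)
      (dictOf (spiral m), 1 + (m : Int) * ((m : Int) + 1), dirAt m, (posEnd m).1, (posEnd m).2)
    = (dictOf (spiral (m + 1)), 1 + ((m : Int) + 1) * ((m : Int) + 2), dirAt (m + 1),
       (posEnd (m + 1)).1, (posEnd (m + 1)).2) := by
  have h2 : PySem.List.pyRange 0 2 1 = [0, 1] := by decide
  have htr : (m : Int) + 1 = ((m + 1 : Nat) : Int) := by push_cast; ring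
  have hstep : (1 : Int) + (m : Int) * ((m : Int) + 1) = ((spiral m).length : Int) := by
    rw [spiral_length]; push_cast; ring
  rw [hstep, htr]
  unfold aLap
  rw [h2]
  simp only [List.foldl_cons, List.foldl_nil]
  rcases Nat.even_or_odd m with ⟨j, hj⟩ | ⟨j, hj⟩
  · -- m even: this lap walks right then up
    subst hj
    have hd : dirAt (j + j) = 0 := by unfold dirAt; rw [if_pos (by omega)]
    have hp : posEnd (j + j) = (-(j : Int), -(j : Int)) := by
      simp only [posEnd]
      rw [if_neg (by omega)]
      simp only [Prod.mk.injEq]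
      constructor <;> omega
    rw [hd, hp]
    dsimp only
    rw [aSeg_spec]
    dsimp only
    have hm1 : PySem.Int.mod (0 + 1) 4 = 1 := by decide
    rw [hm1]
    have hlen1 : ((spiral (j + j)).length : Int) + ((j + j + 1 : Nat) : Int)
        = ((((spiral (j + j)) ++ (List.range (j + j + 1)).map
            (fun (i : Nat) => (-(j : Int) + ((i : Int) + 1) * (vec 0).1,
              -(j : Int) + ((i : Int) + 1) * (vec 0).2))).length : Int)) := by
      simp
    rw [hlen1, aSeg_spec]
    dsimp only
    have hsp : spiral (j + j + 1) = spiral (j + j) ++ trCoords ((j + j : Nat) + 1 : Int) := rfl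
    have hmod : PySem.Int.mod (((j + j : Nat) : Int) + 1) 2 = 1 := by
      simp [PySem.Int.mod, Int.fmod_eq_emod]; omega
    have hfd : PySem.Int.floordiv ((((j + j : Nat) : Int) + 1) + 1) 2 = (j : Int) + 1 := by
      simp [PySem.Int.floordiv, Int.fdiv_eq_ediv]; omega
    have hcast : ((j + j : Nat) : Int) + 1 + 1 = ((j + j + 1 : Nat) : Int) + 1 := by push_cast; ring
    have htc : trCoords ((j + j : Nat) + 1 : Int)
        = (List.range (j + j + 1)).map (fun (i : Nat) => (-(j : Int) + ((i : Int) + 1) * (vec 0).1,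
              -(j : Int) + ((i : Int) + 1) * (vec 0).2))
          ++ (List.range (j + j + 1)).map (fun (i : Nat) =>
              (-(j : Int) + ((j + j + 1 : Nat) : Int) * (vec 0).1 + ((i : Int) + 1) * (vec 1).1,
               -(j : Int) + ((j + j + 1 : Nat) : Int) * (vec 0).2 + ((i : Int) + 1) * (vec 1).2)) := by
      unfold trCoords
      rw [if_pos hmod]
      simp only [hcast]
      congr 1
      · refine (map_range_eq_pyRange _ _ _ ?_).symm
        intro i hi
        simp only [vec, Prod.mk.injEq]
        norm_num
        constructor <;> omega
      · refine (map_range_eq_pyRange _ _ _ ?_).symm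
        intro i hi
        simp only [vec, Prod.mk.injEq]
        norm_num
        constructor <;> omega
    simp only [Prod.mk.injEq]
    refine ⟨?_, ?_, ?_, ?_, ?_⟩
    · rw [hsp, htc, List.append_assoc]
    · simp [spiral_length]; ring
    · have : dirAt (j + j + 1) = 2 := by unfold dirAt; rw [if_neg (by omega)]
      rw [this]; decide
    · have : posEnd (j + j + 1) = ((j : Int) + 1, (j : Int) + 1) := by
        simp only [posEnd]; rw [if_pos (by omega)]
        simp only [Prod.mk.injEq]; constructor <;> omega
      rw [this]; simp [vec]; omega
    · have : posEnd (j + j + 1) = ((j : Int) + 1, (j : Int) + 1) := by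
        simp only [posEnd]; rw [if_pos (by omega)]
        simp only [Prod.mk.injEq]; constructor <;> omega
      rw [this]; simp [vec]; omega
  · -- m odd: this lap walks left then down
    subst hj
    have hd : dirAt (2 * j + 1) = 2 := by unfold dirAt; rw [if_neg (by omega)]
    have hp : posEnd (2 * j + 1) = ((j : Int) + 1, (j : Int) + 1) := by
      simp only [posEnd]
      rw [if_pos (by omega)]
      simp only [Prod.mk.injEq]
      constructor <;> omega
    rw [hd, hp]
    dsimp only
    rw [aSeg_spec]
    dsimp only
    have hm1 : PySem.Int.mod (2 + 1) 4 = 3 := by decide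
    rw [hm1]
    have hlen1 : ((spiral (2 * j + 1)).length : Int) + ((2 * j + 1 + 1 : Nat) : Int)
        = ((((spiral (2 * j + 1)) ++ (List.range (2 * j + 1 + 1)).map
            (fun (i : Nat) => ((j : Int) + 1 + ((i : Int) + 1) * (vec 2).1,
              (j : Int) + 1 + ((i : Int) + 1) * (vec 2).2))).length : Int)) := by
      simp
    rw [hlen1, aSeg_spec]
    dsimp only
    have hsp : spiral (2 * j + 1 + 1) = spiral (2 * j + 1) ++ trCoords ((2 * j + 1 : Nat) + 1 : Int) := rfl
    have hmod : PySem.Int.mod (((2 * j + 1 : Nat) : Int) + 1) 2 = 0 := by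
      simp [PySem.Int.mod, Int.fmod_eq_emod]; omega
    have hcast : ((2 * j + 1 : Nat) : Int) + 1 + 1 = ((2 * j + 1 + 1 : Nat) : Int) + 1 := by push_cast; ring
    have htc : trCoords ((2 * j + 1 : Nat) + 1 : Int)
        = (List.range (2 * j + 1 + 1)).map (fun (i : Nat) => ((j : Int) + 1 + ((i : Int) + 1) * (vec 2).1,
              (j : Int) + 1 + ((i : Int) + 1) * (vec 2).2))
          ++ (List.range (2 * j + 1 + 1)).map (fun (i : Nat) =>
              ((j : Int) + 1 + ((2 * j + 1 + 1 : Nat) : Int) * (vec 2).1 + ((i : Int) + 1) * (vec 3).1,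
               (j : Int) + 1 + ((2 * j + 1 + 1 : Nat) : Int) * (vec 2).2 + ((i : Int) + 1) * (vec 3).2)) := by
      unfold trCoords
      rw [if_neg (by rw [hmod]; norm_num)]
      simp only [hcast]
      congr 1
      · refine (map_range_eq_pyRange _ _ _ ?_).symm
        intro i hi
        simp only [vec, Prod.mk.injEq]
        norm_num
        constructor <;> omega
      · refine (map_range_eq_pyRange _ _ _ ?_).symm
        intro i hi
        simp only [vec, Prod.mk.injEq]
        norm_num
        constructor <;> omega
    simp only [Prod.mk.injEq]
    refine ⟨?_, ?_, ?_, ?_, ?_⟩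
    · rw [hsp, htc, List.append_assoc]
    · simp [spiral_length]; ring
    · have : dirAt (2 * j + 1 + 1) = 0 := by unfold dirAt; rw [if_pos (by omega)]
      rw [this]; decide
    · have : posEnd (2 * j + 1 + 1) = (-((j : Int) + 1), -((j : Int) + 1)) := by
        simp only [posEnd]; rw [if_neg (by omega)]
        simp only [Prod.mk.injEq]; constructor <;> omega
      rw [this]; simp [vec]; omega
    · have : posEnd (2 * j + 1 + 1) = (-((j : Int) + 1), -((j : Int) + 1)) := by
        simp only [posEnd]; rw [if_neg (by omega)]
        simp only [Prod.mk.injEq]; constructor <;> omega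
      rw [this]; simp [vec]; omega

theorem sq_ge (m : Nat) : (m : Int) ≤ (m : Int) * ((m : Int) + 1) := by
  nlinarith [Int.natCast_nonneg m]

theorem bFindT_spec (input : Int) (m : Nat) : bFindT input (m : Int) = (Tfin input m : Int) := by
  have H : ∀ (n : Nat) (m : Nat), (input - m).toNat ≤ n → bFindT input (m : Int) = (Tfin input m : Int) := by
    intro n
    induction n with
    | zero =>
      intro m hm
      have hge := sq_ge m
      rw [bFindT, Tfin, dif_neg (by omega), dif_neg (by omega)]
    | succ n ih =>
      intro m hm
      have hge := sq_ge m
      rw [bFindT, Tfin]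
      split_ifs with h
      · have : (m : Int) + 1 = ((m + 1 : Nat) : Int) := by push_cast; ring
        rw [this]
        exact ih (m + 1) (by omega)
      · rfl
  exact H _ m le_rfl

theorem aLoop_spec (input : Int) (m : Nat) :
    aLoop input (dictOf (spiral m)) (1 + (m : Int) * ((m : Int) + 1)) ((m : Int) + 1)
      (dirAt m) (posEnd m).1 (posEnd m).2 (by omega)
    = dictOf (spiral (Tfin input m)) := by
  have key : ∀ (n : Nat) (m : Nat) (step travel : Int)
      (hs : step = 1 + (m : Int) * ((m : Int) + 1)) (htv : travel = (m : Int) + 1)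
      (hpf : 1 ≤ travel),
      (input - (1 + (m : Int) * ((m : Int) + 1))).toNat ≤ n →
      aLoop input (dictOf (spiral m)) step travel (dirAt m) (posEnd m).1 (posEnd m).2 hpf
        = dictOf (spiral (Tfin input m)) := by
    intro n
    induction n with
    | zero =>
      intro m step travel hs htv hpf hm
      subst hs; subst htv
      have hge := sq_ge m
      rw [aLoop, Tfin, dif_neg (by omega), dif_neg (by omega)]
    | succ n ih =>
      intro m step travel hs htv hpf hm
      subst hs; subst htv
      rw [aLoop, Tfin]
      by_cases h : 1 + (m : Int) * ((m : Int) + 1) < input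
      · rw [dif_pos h, dif_pos h]
        dsimp only
        rw [aLap_spec]
        dsimp only
        refine ih (m + 1) _ _ (by push_cast; ring) (by push_cast; ring) _ ?_
        have hq : ((m : Int) + 1) * ((m : Int) + 2)
            = (m : Int) * ((m : Int) + 1) + 2 * (m : Int) + 2 := by ring
        have hc : ((m + 1 : Nat) : Int) = (m : Int) + 1 := by push_cast; ring
        have hq2 : ((m + 1 : Nat) : Int) * (((m + 1 : Nat) : Int) + 1)
            = (m : Int) * ((m : Int) + 1) + 2 * (m : Int) + 2 := by rw [hc]; ring
        omega
      · rw [dif_neg h, dif_neg h]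
  exact key (input - (1 + (m : Int) * ((m : Int) + 1))).toNat m _ _ rfl rfl _ le_rfl

theorem bRing_eq (acc : List (Int × Int)) (tr : Int) : bRing acc tr = acc ++ trCoords tr := by
  unfold bRing trCoords
  split_ifs <;> simp [List.append_assoc]

theorem bCoords_spec (t : Nat) :
    (PySem.List.pyRange 1 ((t : Int) + 1) 1).foldl bRing [((0 : Int), (0 : Int))] = spiral t := by
  induction t with
  | zero =>
    rw [Nat.cast_zero, zero_add, PySem.List.pyRange_one_eq_nil le_rfl]
    rfl
  | succ t ih =>
    have hcast : ((t + 1 : Nat) : Int) + 1 = ((t : Int) + 1) + 1 := by push_cast; ring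
    rw [hcast, PySem.List.pyRange_one_succ_right (by omega), List.foldl_append, ih]
    simp only [List.foldl_cons, List.foldl_nil]
    rw [bRing_eq]
    rfl

theorem bDict_spec (l : List (Int × Int)) :
    ((PySem.List.enumerate l 0).foldl
      (fun (d : PySem.Dict Int (Int × Int)) p => d.insert (p.1 + 1) p.2) PySem.Dict.empty).items
    = (dictOf l).items := by
  rw [PySem.Dict.items_foldl_insert_fresh (PySem.List.enumerate l 0)
      (fun p => p.1 + 1) (fun p => p.2) PySem.Dict.empty
      (fun a _ => PySem.Dict.contains_empty _) ?nd]
  · rfl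
  · have : List.map (fun (p : Int × Int × Int) => p.1 + 1) (PySem.List.enumerate l 0)
        = List.map (fun z => z + 1) (List.map (fun p => p.1) (PySem.List.enumerate l 0)) := by
      simp [List.map_map]
    rw [this, PySem.List.map_fst_enumerate]
    exact (PySem.List.nodup_pyRange_one _ _).map (fun a b => by omega)

-- ===== VERDICT (by name: the statement is the Claim_ definition above) =====
theorem fill_the_grid_spec : Claim_equal_fill_the_grid := by
  intro input _
  unfold Spec_fill_the_grid fill_the_grid fill_the_grid_alt
  have h0 : PySem.Dict.empty.insert (1 : Int) ((0 : Int), (0 : Int)) = dictOf (spiral 0) := by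
    decide
  have hA := aLoop_spec input 0
  have hd : dirAt 0 = 0 := by norm_num [dirAt]
  have hp : posEnd 0 = (0, 0) := by norm_num [posEnd]
  rw [hd, hp] at hA
  norm_num at hA
  rw [h0, hA]
  show (dictOf (spiral (Tfin input 0))).items =
    ((PySem.List.enumerate ((PySem.List.pyRange 1 (bFindT input 0 + 1) 1).foldl bRing
        [((0 : Int), (0 : Int))]) 0).foldl
      (fun (d : PySem.Dict Int (Int × Int)) p => d.insert (p.1 + 1) p.2) PySem.Dict.empty).items
  have hb : bFindT input 0 = ((Tfin input 0 : Nat) : Int) := by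
    have := bFindT_spec input 0; simpa using this
  rw [hb, bCoords_spec, bDict_spec]
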